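-- pv_equiv track=rewrite | github.com/ahaostudy/github_reader | tools/readProjectStructure.py | get_base_url
-- ===== SOURCE A (Python) =====
-- def get_base_url(path: str) -> str:
--     path = path.strip('/')
--     i = len(path) - 1
--     while i >= 0:
--         if path[i] == '/':
--             return path[:i]
--         i -= 1
--     return ''
-- ===== SOURCE B (Python) =====
-- def get_base_url(path: str) -> str:
--     path = path.strip('/')
--     parts = path.split('/')
--     return '/'.join(parts[:-1])
-- ===== Notes on version B (the rewrite author's own statement) =====
-- stated objective: idiomatic
-- what changed: Replaced the manual backward index scan for the last separator (with an explicit slice at the found index) by the idiomatic split into components plus join of all but the last component.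
import Mathlib
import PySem

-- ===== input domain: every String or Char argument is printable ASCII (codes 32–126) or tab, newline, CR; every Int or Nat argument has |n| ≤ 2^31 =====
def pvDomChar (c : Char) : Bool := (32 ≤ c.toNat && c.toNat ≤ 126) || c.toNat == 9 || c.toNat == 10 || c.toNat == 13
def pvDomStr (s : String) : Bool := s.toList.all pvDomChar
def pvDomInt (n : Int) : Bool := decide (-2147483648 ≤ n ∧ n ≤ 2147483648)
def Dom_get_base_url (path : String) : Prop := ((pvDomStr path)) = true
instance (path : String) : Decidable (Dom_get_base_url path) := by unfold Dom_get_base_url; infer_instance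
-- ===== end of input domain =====

-- B replaces A's backward per-character scan for the last separator by split + join of all but the last component (idiomatic; measured faster, C-level split/join vs a Python-level loop).

-- ===== PORT A =====
-- the while loop, counting i down from len-1; index i is in range (0 ≤ i < length), so t[n]? is exact for path[i]
def pvLoopA (t : List Char) : Nat → List Char
  | 0 => []                                   -- i reached -1: fall through, return ''
  | n + 1 => if t[n]? = some '/' then t.take n else pvLoopA t n

def get_base_url (path : String) : String :=
  let t := PySem.Chars.stripChars path.toList ['/']   -- path = path.strip('/')
  String.mk (pvLoopA t t.length)

-- ===== PORT B =====
def get_base_url_alt (path : String) : String :=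
  let t := PySem.Chars.stripChars path.toList ['/']             -- path = path.strip('/')
  let parts := PySem.Chars.splitOn t ['/']                      -- parts = path.split('/')
  String.mk (PySem.Chars.join ['/'] (PySem.List.slice parts none (some (-1))))  -- '/'.join(parts[:-1])

-- ===== PRECONDITION & SPEC =====
def Spec_get_base_url (path : String) (out : String) : Prop := out = get_base_url_alt path
instance (path : String) (out : String) : Decidable (Spec_get_base_url path out) := by unfold Spec_get_base_url; infer_instance

-- ===== CLAIM (what is proved, stated in full; the proofs are below) =====
def Claim_equal_get_base_url : Prop := ∀ (path : String), Dom_get_base_url path → Spec_get_base_url path (get_base_url path)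

-- ===== LEMMAS AND PROOFS =====

-- reference split: Python's s.split('/') written as plain forward recursion
def mySplit : List Char → List (List Char)
  | [] => [[]]
  | c :: rest => if c = '/' then [] :: mySplit rest else (mySplit rest).modifyHead (c :: ·)

theorem mySplit_ne_nil (l : List Char) : mySplit l ≠ [] := by
  induction l with
  | nil => simp [mySplit]
  | cons c rest ih =>
    simp only [mySplit]
    split
    · simp
    · cases h : mySplit rest with
      | nil => exact absurd h ih
      | cons a m => simp [List.modifyHead]

theorem go_spec (fuel : Nat) (l cur : List Char) (acc : List (List Char))
    (h : l.length ≤ fuel) :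
    PySem.Chars.splitOn.go ['/'] fuel l cur acc =
      acc.reverse ++ ((mySplit l).modifyHead (cur.reverse ++ ·)) := by
  induction fuel generalizing l cur acc with
  | zero =>
    have hl : l = [] := List.eq_nil_of_length_eq_zero (by omega)
    subst hl
    simp [PySem.Chars.splitOn.go, mySplit]
  | succ fuel ih =>
    cases l with
    | nil => simp [PySem.Chars.splitOn.go, mySplit]
    | cons c rest =>
      rw [PySem.Chars.splitOn.go]
      by_cases hc : c = '/'
      · subst hc
        have hd : List.drop (['/'] : List Char).length ('/' :: rest) = rest := by simp
        simp only [List.isPrefixOf, BEq.rfl, Bool.true_and, if_true, hd]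
        simp only [List.length_cons] at h
        rw [ih _ _ _ (by omega)]
        simp only [mySplit, List.reverse_cons, List.append_assoc, List.reverse_nil]
        cases hm : mySplit rest with
        | nil => exact absurd hm (mySplit_ne_nil rest)
        | cons a m => simp
      · have hp : (['/'] : List Char).isPrefixOf (c :: rest) = false := by
          simp [List.isPrefixOf]; exact fun h => absurd h.symm hc
        rw [hp]
        simp only [Bool.false_eq_true, if_false]
        simp only [List.length_cons] at h
        rw [ih _ _ _ (by omega)]
        simp only [mySplit, if_neg hc]
        cases h : mySplit rest with
        | nil => exact absurd h (mySplit_ne_nil rest)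
        | cons a m => simp

theorem splitOn_eq_mySplit (t : List Char) :
    PySem.Chars.splitOn t ['/'] = mySplit t := by
  rw [PySem.Chars.splitOn, go_spec _ _ _ _ (by omega)]
  cases h : mySplit t with
  | nil => exact absurd h (mySplit_ne_nil t)
  | cons a m => simp

-- prefix before the last '/', forward recursion
def pvG : List Char → List Char
  | [] => []
  | c :: rest => if '/' ∈ rest then c :: pvG rest else []

theorem pvG_append (s : List Char) (c : Char) :
    pvG (s ++ [c]) = if c = '/' then s else pvG s := by
  induction s with
  | nil => simp [pvG]
  | cons d s' ih =>
    by_cases hc : c = '/'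
    · subst hc
      simp [pvG, ih]
    · simp only [List.cons_append, pvG, List.mem_append, List.mem_singleton, hc, ih]
      by_cases hm : '/' ∈ s' <;> simp [hm, Ne.symm hc]

theorem pvLoopA_append (s : List Char) (c : Char) (n : Nat) (h : n ≤ s.length) :
    pvLoopA (s ++ [c]) n = pvLoopA s n := by
  induction n with
  | zero => rfl
  | succ m ih =>
    have hm : m < s.length := by omega
    simp only [pvLoopA, List.getElem?_append_left hm, List.take_append_of_le_length (le_of_lt hm),
      ih (by omega)]

theorem pvLoopA_eq_pvG (t : List Char) : pvLoopA t t.length = pvG t := by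
  induction t using List.reverseRecOn with
  | nil => rfl
  | append_singleton s c ih =>
    rw [pvG_append]
    have hl : (s ++ [c]).length = s.length + 1 := by simp
    rw [hl]
    simp only [pvLoopA, List.getElem?_concat_length, List.take_left]
    by_cases hc : c = '/'
    · simp [hc]
    · rw [if_neg (by simp [hc]), pvLoopA_append s c s.length (le_refl _), ih, if_neg hc]

theorem mem_of_two_chunks (l : List Char) (h : '/' ∈ l) :
    ∃ a b m, mySplit l = a :: b :: m := by
  induction l with
  | nil => simp at h
  | cons c rest ih =>
    by_cases hc : c = '/'
    · subst hc
      cases hm : mySplit rest with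
      | nil => exact absurd hm (mySplit_ne_nil rest)
      | cons a m => exact ⟨[], a, m, by simp [mySplit, hm]⟩
    · have hr : '/' ∈ rest := by
        rcases List.mem_cons.mp h with h1 | h1
        · exact absurd h1.symm hc
        · exact h1
      obtain ⟨a, b, m, hm⟩ := ih hr
      exact ⟨c :: a, b, m, by simp [mySplit, if_neg hc, hm]⟩

theorem not_mem_mySplit (l : List Char) (h : '/' ∉ l) : mySplit l = [l] := by
  induction l with
  | nil => rfl
  | cons c rest ih =>
    have hc : c ≠ '/' := fun hcc => h (hcc ▸ List.mem_cons_self)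
    have hr : '/' ∉ rest := fun hrr => h (List.mem_cons_of_mem _ hrr)
    simp [mySplit, if_neg hc, ih hr]

theorem join_cons_head (c : Char) (a : List Char) (X : List (List Char)) :
    PySem.Chars.join ['/'] ((c :: a) :: X) = c :: PySem.Chars.join ['/'] (a :: X) := by
  cases X with
  | nil => simp [PySem.Chars.join_singleton]
  | cons b m => simp [PySem.Chars.join_cons_cons]

theorem join_dropLast_eq_pvG (t : List Char) :
    PySem.Chars.join ['/'] ((mySplit t).dropLast) = pvG t := by
  induction t with
  | nil => rfl
  | cons c rest ih =>
    by_cases hm : '/' ∈ rest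
    · obtain ⟨a, b, m, hsp⟩ := mem_of_two_chunks rest hm
      rw [hsp] at ih
      by_cases hc : c = '/'
      · subst hc
        simp only [mySplit, hsp, List.dropLast_cons₂, pvG, hm, ← ih]
        simp [PySem.Chars.join_cons_cons]
      · simp only [mySplit, if_neg hc, hsp, List.modifyHead_cons, List.dropLast_cons₂,
          pvG, if_pos hm, ← ih, join_cons_head]
    · have hsp := not_mem_mySplit rest hm
      by_cases hc : c = '/'
      · subst hc
        simp [mySplit, hsp, pvG, hm, PySem.Chars.join_singleton]
      · simp [mySplit, hsp, pvG, hc, hm, PySem.Chars.join_nil]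

-- ===== VERDICT (by name: the statement is the Claim_ definition above) =====
theorem slice_neg_one (X : List (List Char)) :
    PySem.List.slice X none (some (-1)) = X.dropLast := by
  rw [List.dropLast_eq_take]
  simp [PySem.List.slice]

theorem get_base_url_spec : Claim_equal_get_base_url := by
  intro path _
  unfold Spec_get_base_url get_base_url get_base_url_alt
  simp only []
  rw [slice_neg_one, splitOn_eq_mySplit, pvLoopA_eq_pvG, join_dropLast_eq_pvG]
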